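-- pv_equiv track=rewrite | github.com/kikompakt/kiki | simple_orchestrator.py | _extract_course_description
-- ===== SOURCE A (Python) =====
-- def _extract_course_description(content: str) -> str:
--     """Extract course description from content"""
--     lines = content.split('\n')
--     description_lines = []
--
--     found_title = False
--     for line in lines:
--         line = line.strip()
--         if not line:
--             continue
--         if not found_title and (line.startswith('#') or line.startswith('**')):
--             found_title = True
--             continue
--         if found_title and len(description_lines) < 2:
--             if not line.startswith('#') and not line.startswith('**'):
--                 description_lines.append(line)
--             else:
--                 break
--
--     return ' '.join(description_lines)[:500] if description_lines else "KI-generierter Kurs"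
-- ===== SOURCE B (Python) =====
-- def _extract_course_description(content: str) -> str:
--     def is_header(l):
--         return l.startswith('#') or l.startswith('**')
--     cleaned = [l.strip() for l in content.split('\n') if l.strip()]
--     # running count of header lines seen so far (inclusive of the current line)
--     counts = []
--     n = 0
--     for l in cleaned:
--         if is_header(l):
--             n += 1
--         counts.append(n)
--     # description = lines lying in the region after the 1st and before the 2nd header
--     desc = [l for l, c in zip(cleaned, counts) if c == 1 and not is_header(l)][:2]
--     return ' '.join(desc)[:500] if desc else "KI-generierter Kurs"
-- ===== Notes on version B (the rewrite author's own statement) =====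
-- stated objective: alternative
-- what changed: Replaced A's stateful flag-and-break scan by a prefix-count formulation: compute the running count of header lines, then the description is the non-header lines whose count is exactly 1 (between the first and second header), capped at two.
import Mathlib
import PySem

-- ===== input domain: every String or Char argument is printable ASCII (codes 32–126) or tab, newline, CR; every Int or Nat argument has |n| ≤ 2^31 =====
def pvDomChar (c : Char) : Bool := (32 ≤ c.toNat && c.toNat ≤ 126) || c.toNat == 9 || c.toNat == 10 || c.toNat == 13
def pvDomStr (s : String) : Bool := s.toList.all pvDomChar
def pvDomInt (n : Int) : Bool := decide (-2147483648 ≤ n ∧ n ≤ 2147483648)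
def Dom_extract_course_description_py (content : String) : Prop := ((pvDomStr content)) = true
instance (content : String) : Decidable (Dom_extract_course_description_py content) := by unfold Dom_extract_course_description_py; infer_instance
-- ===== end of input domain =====

-- B replaces A's stateful flag-and-break scan by a prefix count of header lines plus a
-- filter: keep the lines whose running header count is exactly 1; objective: alternative.

-- ===== PORT A =====
-- line.startswith('#') or line.startswith('**')
def pvIsHeaderA (s : List Char) : Bool :=
  PySem.Chars.startswith s ['#'] || PySem.Chars.startswith s ['*', '*']

-- A's for-loop, state = (found_title, description_lines); 'break' returns the accumulator
def pvLoopA : List (List Char) → Bool → List (List Char) → List (List Char)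
  | [], _, desc => desc
  | l :: ls, found, desc =>
    let s := PySem.Chars.strip l
    if s = [] then pvLoopA ls found desc
    else if !found && pvIsHeaderA s then pvLoopA ls true desc
    else if found && desc.length < 2 then
      if !pvIsHeaderA s then pvLoopA ls found (desc ++ [s])
      else desc
    else pvLoopA ls found desc

def extract_course_description_py (content : String) : String :=
  let lines := PySem.Chars.splitOn content.toList ['\n']
  let desc := pvLoopA lines false []
  if desc = [] then "KI-generierter Kurs"
  else String.ofList (PySem.Chars.slice (PySem.Chars.join [' '] desc) none (some 500))

-- ===== PORT B =====
def pvIsHeaderB (s : List Char) : Bool :=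
  PySem.Chars.startswith s ['#'] || PySem.Chars.startswith s ['*', '*']

-- B's counting loop: running number of header lines seen so far (inclusive of current line)
def pvCountsB : List (List Char) → Nat → List Nat
  | [], _ => []
  | l :: ls, n =>
    let n' := if pvIsHeaderB l then n + 1 else n
    n' :: pvCountsB ls n'

def extract_course_description_py_alt (content : String) : String :=
  let cleaned := ((PySem.Chars.splitOn content.toList ['\n']).map PySem.Chars.strip).filter (· ≠ [])
  let counts := pvCountsB cleaned 0
  let desc := (((cleaned.zip counts).filter (fun p => p.2 == 1 && !pvIsHeaderB p.1)).map Prod.fst).take 2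
  if desc = [] then "KI-generierter Kurs"
  else String.ofList (PySem.Chars.slice (PySem.Chars.join [' '] desc) none (some 500))

-- ===== PRECONDITION & SPEC =====
def Spec_extract_course_description_py (content : String) (out : String) : Prop := out = extract_course_description_py_alt content
instance (content : String) (out : String) : Decidable (Spec_extract_course_description_py content out) := by unfold Spec_extract_course_description_py; infer_instance

-- ===== CLAIM =====
def Claim_equal_extract_course_description_py : Prop := ∀ (content : String), Dom_extract_course_description_py content → Spec_extract_course_description_py content (extract_course_description_py content)

-- ===== LEMMAS AND PROOFS =====

-- A's loop over raw lines equals the same state machine over the cleaned lines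
def pvLoopA' : List (List Char) → Bool → List (List Char) → List (List Char)
  | [], _, desc => desc
  | s :: ls, found, desc =>
    if !found && pvIsHeaderA s then pvLoopA' ls true desc
    else if found && desc.length < 2 then
      if !pvIsHeaderA s then pvLoopA' ls found (desc ++ [s])
      else desc
    else pvLoopA' ls found desc

theorem pvLoopA_eq_clean (l : List (List Char)) (found : Bool) (desc : List (List Char)) :
    pvLoopA l found desc = pvLoopA' ((l.map PySem.Chars.strip).filter (· ≠ [])) found desc := by
  induction l generalizing found desc with
  | nil => rfl
  | cons x xs ih =>
    by_cases hs : PySem.Chars.strip x = []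
    · simp [pvLoopA, hs, ih]
    · have hf : List.filter (fun x => decide (x ≠ [])) (List.map PySem.Chars.strip (x :: xs))
          = PySem.Chars.strip x :: List.filter (fun x => decide (x ≠ [])) (List.map PySem.Chars.strip xs) := by
        simp [hs]
      rw [hf]
      simp only [pvLoopA, pvLoopA', if_neg hs]
      split_ifs <;> simp [ih]

-- fused form of B's zip/filter pipeline (proof device, not part of the ports)
def pvTagFilter : List (List Char) → Nat → List (List Char)
  | [], _ => []
  | l :: ls, n =>
    if pvIsHeaderB l then pvTagFilter ls (n + 1)
    else if n = 1 then l :: pvTagFilter ls n else pvTagFilter ls n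

theorem pvZipFilter_eq_tag (l : List (List Char)) (n : Nat) :
    (((l.zip (pvCountsB l n)).filter (fun p => p.2 == 1 && !pvIsHeaderB p.1)).map Prod.fst)
      = pvTagFilter l n := by
  induction l generalizing n with
  | nil => rfl
  | cons x xs ih =>
    cases hh : pvIsHeaderB x with
    | true => simp [pvCountsB, pvTagFilter, hh, ih]
    | false =>
      by_cases hn : n = 1 <;> simp [pvCountsB, pvTagFilter, hh, hn, ih]

theorem pvTagFilter_ge2 (l : List (List Char)) (n : Nat) (h : 2 ≤ n) :
    pvTagFilter l n = [] := by
  induction l generalizing n with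
  | nil => rfl
  | cons x xs ih =>
    have h1 : n ≠ 1 := by omega
    simp only [pvTagFilter, h1, if_false]
    split
    · exact ih (n + 1) (by omega)
    · exact ih n h

theorem pvLoopA'_sat (l : List (List Char)) (desc : List (List Char)) (h : 2 ≤ desc.length) :
    pvLoopA' l true desc = desc := by
  induction l with
  | nil => rfl
  | cons s ls ih =>
    simp only [pvLoopA']
    have : ¬ (desc.length < 2) := by omega
    simp [this, ih]

theorem pvLoopA'_post (l : List (List Char)) (desc : List (List Char)) (h : desc.length < 2) :
    pvLoopA' l true desc = (desc ++ pvTagFilter l 1).take 2 := by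
  induction l generalizing desc with
  | nil =>
    simp [pvLoopA', pvTagFilter, List.take_of_length_le (by omega : desc.length ≤ 2)]
  | cons s ls ih =>
    have hAB : pvIsHeaderA = pvIsHeaderB := rfl
    simp only [pvLoopA', pvTagFilter, hAB, Bool.not_true, Bool.false_and, Bool.false_eq_true,
      if_false, Bool.true_and]
    rw [if_pos (by simp [h])]
    cases hh : pvIsHeaderB s with
    | true =>
      simp only [if_true, Bool.not_true, Bool.false_eq_true, if_false]
      rw [pvTagFilter_ge2 ls 2 (by omega)]
      simp [List.take_of_length_le (by omega : desc.length ≤ 2)]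
    | false =>
      simp only [Bool.not_false, if_true, Bool.false_eq_true, if_false]
      have hasc : desc ++ s :: pvTagFilter ls 1 = (desc ++ [s]) ++ pvTagFilter ls 1 := by simp
      by_cases h2 : (desc ++ [s]).length = 2
      · rw [pvLoopA'_sat ls _ (by omega), hasc, ← h2, List.take_left]
      · have h2' : (desc ++ [s]).length < 2 := by
          simp only [List.length_append, List.length_cons, List.length_nil] at h2 ⊢; omega
        rw [ih _ h2', hasc]

theorem pvLoopA'_pre (l : List (List Char)) :
    pvLoopA' l false [] = (pvTagFilter l 0).take 2 := by
  induction l with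
  | nil => rfl
  | cons s ls ih =>
    have hAB : pvIsHeaderA = pvIsHeaderB := rfl
    simp only [pvLoopA', pvTagFilter, hAB]
    cases hh : pvIsHeaderB s with
    | true =>
      simp only [Bool.not_false, Bool.true_and, if_true]
      exact pvLoopA'_post ls [] (by simp)
    | false =>
      simp [ih]

-- ===== VERDICT =====
theorem extract_course_description_py_spec : Claim_equal_extract_course_description_py := by
  intro content _
  unfold Spec_extract_course_description_py extract_course_description_py extract_course_description_py_alt
  simp only [pvLoopA_eq_clean, pvLoopA'_pre, pvZipFilter_eq_tag]
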